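-- pv_equiv track=rewrite | github.com/hungnmai/txt2kw_training | text_processing.py | sep_punct_from_str
-- ===== SOURCE A (Python) =====
-- import string
--
-- def sep_punct_from_str(token: str, remove_punt: bool = True) -> list:
--     """
--     Check and remove punctuation at the end of token
--     :param token:
--     :param remove_punt: remove punt in text
--     :return:
--     """
--     last_idx = len(token)
--     for i in range(len(token) - 1, -1, -1):
--         if token[i] in string.punctuation:
--             last_idx = i
--         else:
--             break
--     if last_idx != len(token):
--
--         return [token[0:last_idx], token[last_idx:]]
--     else:
--         return [token]
-- ===== SOURCE B (Python) =====
-- import string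
--
-- def sep_punct_from_str(token: str, remove_punt: bool = True) -> list:
--     # single forward pass: cut = index just after the last non-punctuation char
--     punct = set(string.punctuation)
--     cut = 0
--     for i, c in enumerate(token):
--         if c not in punct:
--             cut = i + 1
--     if cut == len(token):
--         return [token]
--     return [token[:cut], token[cut:]]
-- ===== Notes on version B (the rewrite author's own statement) =====
-- stated objective: alternative
-- what changed: Instead of scanning backward from the end with early break, B makes one forward pass over the whole token, maintaining the index just after the last non-punctuation character seen, and splits there.
import Mathlib
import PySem

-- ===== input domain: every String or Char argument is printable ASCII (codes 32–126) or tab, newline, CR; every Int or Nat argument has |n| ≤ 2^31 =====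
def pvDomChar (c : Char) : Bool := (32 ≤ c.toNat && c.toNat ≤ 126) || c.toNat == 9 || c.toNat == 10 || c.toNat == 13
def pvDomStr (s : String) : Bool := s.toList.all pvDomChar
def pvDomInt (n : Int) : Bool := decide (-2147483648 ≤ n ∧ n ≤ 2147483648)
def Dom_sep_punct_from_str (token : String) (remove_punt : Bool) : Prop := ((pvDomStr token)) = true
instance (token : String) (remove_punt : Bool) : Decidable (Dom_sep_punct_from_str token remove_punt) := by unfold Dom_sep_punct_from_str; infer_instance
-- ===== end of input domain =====

-- B replaces A's backward scan (with early break) by one forward pass that tracks the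
-- index just after the last non-punctuation character (alternative decomposition).

-- string.punctuation, shared literal of both Pythons
def pvPunct : List Char := "!\"#$%&'()*+,-./:;<=>?@[\\]^_`{|}~".toList

-- 'c in string.punctuation' / 'c in punct' (single char membership)
def pvIsPunct (c : Char) : Bool := c ∈ pvPunct

-- ===== PORT A =====
-- the for-loop: for i in range(len(token)-1, -1, -1): if token[i] in punct: last_idx = i else: break
def pvALoop (cs : List Char) : List Int → Int → Int
  | [], last => last
  | i :: rest, last =>
    match PySem.List.pyGet? cs i with
    | some c => if pvIsPunct c then pvALoop cs rest i else last
    | none => last   -- unreachable: every i of the range is in bounds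

def sep_punct_from_str (token : String) (remove_punt : Bool) : List String :=
  let n : Int := (token.toList.length : Int)
  let last_idx := pvALoop token.toList (PySem.List.pyRange (n - 1) (-1) (-1)) n
  if last_idx ≠ n then
    [PySem.Str.slice token (some 0) (some last_idx), PySem.Str.slice token (some last_idx) none]
  else
    [token]

-- ===== PORT B =====
-- the for-loop: for i, c in enumerate(token): if c not in punct: cut = i + 1
def pvBLoop : List Char → Nat → Nat → Nat
  | [], _, cut => cut
  | c :: rest, i, cut => pvBLoop rest (i + 1) (if pvIsPunct c then cut else i + 1)

def sep_punct_from_str_alt (token : String) (remove_punt : Bool) : List String :=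
  let cut := pvBLoop token.toList 0 0
  if cut = token.toList.length then
    [token]
  else
    [PySem.Str.slice token none (some (cut : Int)), PySem.Str.slice token (some (cut : Int)) none]

-- ===== PRECONDITION & SPEC =====
def Spec_sep_punct_from_str (token : String) (remove_punt : Bool) (out : List String) : Prop := out = sep_punct_from_str_alt token remove_punt
instance (token : String) (remove_punt : Bool) (out : List String) : Decidable (Spec_sep_punct_from_str token remove_punt out) := by unfold Spec_sep_punct_from_str; infer_instance

-- ===== CLAIM =====
def Claim_equal_sep_punct_from_str : Prop := ∀ (token : String) (remove_punt : Bool), Dom_sep_punct_from_str token remove_punt → Spec_sep_punct_from_str token remove_punt (sep_punct_from_str token remove_punt)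

-- ===== LEMMAS AND PROOFS =====

-- A's loop computes j - t, where t is the length of the maximal punctuation suffix of (cs.take j)
lemma pvALoop_spec (cs : List Char) (j : Nat) (hj : j ≤ cs.length) (last : Int) :
    pvALoop cs (PySem.List.pyRange ((j : Int) - 1) (-1) (-1)) last =
      (if ((cs.take j).reverse.takeWhile pvIsPunct).length = 0 then last
       else (j : Int) - ((cs.take j).reverse.takeWhile pvIsPunct).length) := by
  induction j generalizing last with
  | zero =>
    rw [show ((0 : Nat) : Int) - 1 = -1 by norm_num,
        PySem.List.pyRange_neg_one_eq_nil (by norm_num)]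
    simp [pvALoop]
  | succ j ih =>
    have hjlt : j < cs.length := hj
    rw [show ((j + 1 : Nat) : Int) - 1 = (j : Int) by push_cast; ring,
        PySem.List.pyRange_neg_one_cons (by omega : (-1:Int) < (j:Int))]
    simp only [pvALoop, PySem.List.pyGet?_natCast, List.getElem?_eq_getElem hjlt]
    rw [List.take_add_one, List.getElem?_eq_getElem hjlt]
    simp only [Option.toList_some, List.reverse_append, List.reverse_cons, List.reverse_nil,
      List.nil_append, List.cons_append, List.takeWhile]
    by_cases hp : pvIsPunct cs[j]
    · rw [if_pos hp, hp, ih (le_of_lt hjlt) (j : Int)]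
      simp only [List.length_cons]
      rw [if_neg (by omega : ¬((List.takeWhile pvIsPunct (List.take j cs).reverse).length + 1 = 0))]
      split_ifs with h1
      · push_cast
        omega
      · push_cast
        omega
    · rw [if_neg hp, Bool.not_eq_true] at *
      rw [hp]
      simp

-- B's loop processes an appended last element after the rest, at index i + xs.length
lemma pvBLoop_append (xs : List Char) (x : Char) (i cut : Nat) :
    pvBLoop (xs ++ [x]) i cut =
      (if pvIsPunct x then pvBLoop xs i cut else i + xs.length + 1) := by
  induction xs generalizing i cut with
  | nil => simp [pvBLoop]
  | cons c rest ih =>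
    simp only [List.cons_append, pvBLoop, ih, List.length_cons]
    split_ifs <;> omega

-- B's loop from (0,0) computes n - t, with t the length of the maximal punctuation suffix
lemma pvBLoop_spec (cs : List Char) :
    pvBLoop cs 0 0 = cs.length - (cs.reverse.takeWhile pvIsPunct).length := by
  induction cs using List.reverseRecOn with
  | nil => simp [pvBLoop]
  | append_singleton xs x ih =>
    rw [pvBLoop_append]
    have ht : (xs.reverse.takeWhile pvIsPunct).length ≤ xs.length := by
      simpa using (List.takeWhile_sublist (p := pvIsPunct) (l := xs.reverse)).length_le
    by_cases hp : pvIsPunct x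
    · rw [if_pos hp, ih]
      simp only [List.reverse_append, List.reverse_cons, List.reverse_nil, List.nil_append,
        List.cons_append, List.takeWhile, hp, List.length_append, List.length_cons,
        List.length_nil]
      omega
    · rw [if_neg hp]
      have hp' : pvIsPunct x = false := by simpa using hp
      simp only [List.reverse_append, List.reverse_cons, List.reverse_nil, List.nil_append,
        List.cons_append, List.takeWhile, hp', List.length_append]
      simp

-- ===== VERDICT =====
theorem sep_punct_from_str_spec : Claim_equal_sep_punct_from_str := by
  intro token remove_punt _
  unfold Spec_sep_punct_from_str sep_punct_from_str sep_punct_from_str_alt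
  have ht : (token.toList.reverse.takeWhile pvIsPunct).length ≤ token.toList.length := by
    simpa using (List.takeWhile_sublist (p := pvIsPunct) (l := token.toList.reverse)).length_le
  have hloop := pvALoop_spec token.toList token.toList.length le_rfl (token.toList.length : Int)
  rw [List.take_length] at hloop
  simp only [hloop, pvBLoop_spec]
  set t := (token.toList.reverse.takeWhile pvIsPunct).length with htdef
  by_cases h0 : t = 0
  · rw [if_pos h0, if_neg (by simp), if_pos (by omega)]
  · rw [if_neg h0,
      if_pos (by omega : ((token.toList.length : Int) - (t : Int)) ≠ (token.toList.length : Int)),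
      if_neg (by omega : ¬(token.toList.length - t = token.toList.length))]
    have hk : ((token.toList.length : Int) - (t : Int)) = ((token.toList.length - t : Nat) : Int) := by
      push_cast; omega
    rw [hk]
    congr 1
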